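-- pv_equiv track=rewrite | github.com/LinZhihao-723/LogIngestorServer | scripts/empty.py | parse_worker_ids
-- ===== SOURCE A (Python) =====
-- from typing import List, Optional, Tuple
--
-- def parse_worker_ids(spec: str) -> List[int]:
--     ids = set()
--     parts = [p.strip() for p in spec.split(",") if p.strip()]
--     for part in parts:
--         if "-" in part:
--             a, b = part.split("-", 1)
--             start = int(a.strip())
--             end = int(b.strip())
--             if end < start:
--                 raise ValueError(f"Invalid range '{part}' (end < start)")
--             for i in range(start, end + 1):
--                 ids.add(i)
--         else:
--             ids.add(int(part))
--     return sorted(ids)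
-- ===== SOURCE B (Python) =====
-- def parse_worker_ids(spec):
--     parts = [p.strip() for p in spec.split(",") if p.strip()]
--     intervals = []
--     for part in parts:
--         if "-" in part:
--             a, b = part.split("-", 1)
--             lo = int(a.strip())
--             hi = int(b.strip())
--             if hi < lo:
--                 raise ValueError(f"Invalid range '{part}' (end < start)")
--         else:
--             lo = hi = int(part)
--         intervals.append((lo, hi))
--     intervals.sort(key=lambda t: t[0])
--     out = []
--     for lo, hi in intervals:
--         if out and out[-1] >= lo:
--             lo = out[-1] + 1
--         out.extend(range(lo, hi + 1))
--     return out
-- ===== Notes on version B (the rewrite author's own statement) =====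
-- stated objective: alternative
-- what changed: B replaces A's hash-set deduplication (add every id of every range to a set, then sort the set) by parsing each part into a (start, end) interval, sorting the intervals by start, and expanding them in one sweep that clips each interval above the last emitted id, so duplicates are never materialised and only the interval list is sorted.
import Mathlib
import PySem

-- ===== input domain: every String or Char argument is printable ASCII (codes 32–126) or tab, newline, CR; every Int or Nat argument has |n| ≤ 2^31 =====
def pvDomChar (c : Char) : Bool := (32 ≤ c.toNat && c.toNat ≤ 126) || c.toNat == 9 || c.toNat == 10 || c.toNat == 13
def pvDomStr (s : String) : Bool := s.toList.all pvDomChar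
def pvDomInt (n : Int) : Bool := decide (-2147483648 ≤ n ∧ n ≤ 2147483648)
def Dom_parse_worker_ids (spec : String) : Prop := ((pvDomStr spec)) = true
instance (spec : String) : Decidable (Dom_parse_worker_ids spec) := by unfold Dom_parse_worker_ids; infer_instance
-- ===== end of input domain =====

-- B replaces A's hash-set deduplication by sorting the parsed (start, end) intervals by
-- start and sweeping once, expanding each interval clipped above the last emitted id
-- (objective: alternative — no set, one interval sort instead of sorting all expanded ids).

-- ===== PORT A =====
def parse_worker_ids (spec : String) : List Int :=
  -- [p.strip() for p in spec.split(",") if p.strip()]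
  let parts := (((PySem.Str.split? spec ",").getD []).map PySem.Str.strip).filter (fun p => p ≠ "")
  let ids : PySem.Set Int := parts.foldl (fun ids part =>
    if PySem.Str.isIn "-" part then
      match PySem.Str.splitMax? part "-" 1 with
      | some [a, b] =>
        match PySem.Int.ofStr? (PySem.Str.strip a), PySem.Int.ofStr? (PySem.Str.strip b) with
        | some s, some e =>
          if e < s then ids  -- Python raises ValueError here: excluded by Pre_
          else (PySem.List.pyRange s (e + 1) 1).foldl PySem.Set.add ids
        | _, _ => ids        -- int() raises ValueError: excluded by Pre_
      | _ => ids             -- unreachable (split with maxsplit=1 on a string containing "-")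
    else
      match PySem.Int.ofStr? part with
      | some v => PySem.Set.add ids v
      | none => ids) PySem.Set.empty  -- int() raises ValueError: excluded by Pre_
  PySem.List.sorted ids (fun x => x) false

-- ===== PORT B =====
def parse_worker_ids_alt (spec : String) : List Int :=
  -- [p.strip() for p in spec.split(",") if p.strip()]
  let parts := (((PySem.Str.split? spec ",").getD []).map PySem.Str.strip).filter (fun p => p ≠ "")
  let intervals : List (Int × Int) := parts.foldl (fun acc part =>
    if PySem.Str.isIn "-" part then
      -- a, b = part.split("-", 1); lo = int(a.strip()); hi = int(b.strip())
      let ab := (PySem.Str.splitMax? part "-" 1).getD []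
      let lo? := PySem.Int.ofStr? (PySem.Str.strip (ab.headD ""))
      let hi? := PySem.Int.ofStr? (PySem.Str.strip ((ab.drop 1).headD ""))
      if lo?.isSome && hi?.isSome then
        if hi?.getD 0 < lo?.getD 0 then acc  -- Python raises ValueError here: excluded by Pre_
        else acc ++ [(lo?.getD 0, hi?.getD 0)]
      else acc                               -- int() raises ValueError: excluded by Pre_
    else
      let v? := PySem.Int.ofStr? part
      if v?.isSome then acc ++ [(v?.getD 0, v?.getD 0)]
      else acc) []                           -- int() raises ValueError: excluded by Pre_
  let intervals := PySem.List.sorted intervals (fun t => t.1) false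
  intervals.foldl (fun out t =>
    -- if out and out[-1] >= lo: lo = out[-1] + 1
    let lo := if 0 < out.length ∧ t.1 ≤ out.getLastD 0 then out.getLastD 0 + 1 else t.1
    out ++ PySem.List.pyRange lo (t.2 + 1) 1) []

-- ===== PRECONDITION & SPEC =====
-- a comma part (stripped, nonempty) on which A returns rather than raising ValueError:
-- a valid int, or a 'a-b' whose halves are valid ints with a ≤ b
def pvPartOk (p : String) : Bool :=
  if PySem.Str.isIn "-" p then
    let ab := (PySem.Str.splitMax? p "-" 1).getD []
    ab.length == 2 &&
      (PySem.Int.ofStr? (PySem.Str.strip (ab.headD ""))).isSome &&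
      (PySem.Int.ofStr? (PySem.Str.strip ((ab.drop 1).headD ""))).isSome &&
      decide ((PySem.Int.ofStr? (PySem.Str.strip (ab.headD ""))).getD 0 ≤
              (PySem.Int.ofStr? (PySem.Str.strip ((ab.drop 1).headD ""))).getD 0)
  else (PySem.Int.ofStr? p).isSome

-- Pre_ excludes exactly the inputs on which A raises ValueError (a part that is not a
-- valid int / range of ints, or a range with end < start); A returns on everything else.
def Pre_parse_worker_ids (spec : String) : Prop :=
  ∀ p ∈ ((((PySem.Str.split? spec ",").getD []).map PySem.Str.strip).filter (fun p => p ≠ "")), pvPartOk p = true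
instance (spec : String) : Decidable (Pre_parse_worker_ids spec) := by
  unfold Pre_parse_worker_ids; infer_instance

def pvWitness_parse_worker_ids : String := "4-6, 2 ,5-5,1"

def Spec_parse_worker_ids (spec : String) (out : List Int) : Prop := out = parse_worker_ids_alt spec
instance (spec : String) (out : List Int) : Decidable (Spec_parse_worker_ids spec out) := by unfold Spec_parse_worker_ids; infer_instance

-- ===== CLAIM (what is proved, stated in full; the proofs are below) =====
def Claim_equal_parse_worker_ids : Prop := ∀ (spec : String), Dom_parse_worker_ids spec → Pre_parse_worker_ids spec → Spec_parse_worker_ids spec (parse_worker_ids spec)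

-- ===== LEMMAS AND PROOFS =====

-- the interval denoted by an OK part
def pvIv (p : String) : Int × Int :=
  if PySem.Str.isIn "-" p then
    let ab := (PySem.Str.splitMax? p "-" 1).getD []
    ((PySem.Int.ofStr? (PySem.Str.strip (ab.headD ""))).getD 0,
     (PySem.Int.ofStr? (PySem.Str.strip ((ab.drop 1).headD ""))).getD 0)
  else ((PySem.Int.ofStr? p).getD 0, (PySem.Int.ofStr? p).getD 0)

def pvRng (t : Int × Int) : List Int := PySem.List.pyRange t.1 (t.2 + 1) 1

-- B's sweep loop, as a named function (identical to the final fold of parse_worker_ids_alt)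
def pvSweep (I : List (Int × Int)) (out : List Int) : List Int :=
  I.foldl (fun out t =>
    let lo := if 0 < out.length ∧ t.1 ≤ out.getLastD 0 then out.getLastD 0 + 1 else t.1
    out ++ PySem.List.pyRange lo (t.2 + 1) 1) out

def pvLo (out : List Int) (s : Int) : Int :=
  if 0 < out.length ∧ s ≤ out.getLastD 0 then out.getLastD 0 + 1 else s

theorem pvLo_none {out : List Int} (h : out.getLast? = none) (s : Int) : pvLo out s = s := by
  unfold pvLo; rw [List.getLast?_eq_none_iff] at h; subst h; simp

theorem pvLo_some {out : List Int} {l : Int} (h : out.getLast? = some l) (s : Int) :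
    pvLo out s = if l ≥ s then l + 1 else s := by
  unfold pvLo
  have h1 : out.getLastD 0 = l := by rw [List.getLastD_eq_getLast?, h]; rfl
  have h2 : 0 < out.length := by cases out <;> simp_all
  rw [h1]
  simp [h2, ge_iff_le]

theorem pvSweep_nil (out : List Int) : pvSweep [] out = out := rfl

theorem pvSweep_cons (t : Int × Int) (rest : List (Int × Int)) (out : List Int) :
    pvSweep (t :: rest) out = pvSweep rest (out ++ PySem.List.pyRange (pvLo out t.1) (t.2 + 1) 1) := rfl

-- in a strictly increasing list the last element is maximal
theorem pvLast_max : ∀ (out : List Int), out.Pairwise (· < ·) →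
    ∀ l : Int, out.getLast? = some l → ∀ y ∈ out, y ≤ l := by
  intro out
  induction out with
  | nil => intro _ l hl; simp at hl
  | cons a tl ih =>
    intro h l hl
    rcases List.pairwise_cons.mp h with ⟨ha, htl⟩
    cases tl with
    | nil =>
      simp only [List.getLast?_singleton, Option.some.injEq] at hl
      intro y hy
      rcases List.mem_singleton.mp hy with rfl
      omega
    | cons b u =>
      rw [List.getLast?_cons_cons] at hl
      intro y hy
      rcases List.mem_cons.mp hy with rfl | hy
      · exact le_of_lt (ha l (List.mem_of_getLast? hl))
      · exact ih htl l hl y hy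

-- the sweep invariant: over intervals sorted by start, starting from a strictly
-- increasing prefix with no gaps above any future start, the sweep produces a strictly
-- increasing list whose members are exactly the prefix plus the covered integers
theorem pvSweep_spec (I : List (Int × Int)) (out : List Int)
    (h1 : I.Pairwise (fun a b => a.1 ≤ b.1))
    (h2 : out.Pairwise (· < ·))
    (h3 : ∀ t ∈ I, ∀ x : Int, t.1 ≤ x → (∃ y ∈ out, x ≤ y) → x ∈ out) :
    (pvSweep I out).Pairwise (· < ·) ∧
    ∀ x : Int, (x ∈ pvSweep I out ↔ x ∈ out ∨ ∃ t ∈ I, t.1 ≤ x ∧ x ≤ t.2) := by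
  induction I generalizing out with
  | nil => exact ⟨by simpa [pvSweep_nil] using h2, by simp [pvSweep_nil]⟩
  | cons t rest ih =>
    rcases List.pairwise_cons.mp h1 with ⟨hstart, hrest⟩
    set lo := pvLo out t.1 with hlo_def
    set out' : List Int := out ++ PySem.List.pyRange lo (t.2 + 1) 1 with hout'_def
    have hlo_gt : ∀ y ∈ out, y < lo := by
      intro y hy
      cases hgl : out.getLast? with
      | none => rw [List.getLast?_eq_none_iff] at hgl; simp [hgl] at hy
      | some l =>
        have hyl := pvLast_max out h2 l hgl y hy
        rw [hlo_def, pvLo_some hgl]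
        by_cases hc : l ≥ t.1
        · rw [if_pos hc]; omega
        · rw [if_neg hc]; omega
    have hlo_ge : t.1 ≤ lo := by
      rw [hlo_def]
      cases hgl : out.getLast? with
      | none => rw [pvLo_none hgl]
      | some l =>
        rw [pvLo_some hgl]
        by_cases hc : l ≥ t.1
        · rw [if_pos hc]; omega
        · rw [if_neg hc]
    have hx_low : ∀ x : Int, t.1 ≤ x → x < lo → x ∈ out := by
      intro x hx hxlo
      rw [hlo_def] at hxlo
      cases hgl : out.getLast? with
      | none => rw [pvLo_none hgl] at hxlo; omega
      | some l =>
        rw [pvLo_some hgl] at hxlo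
        by_cases hc : l ≥ t.1
        · rw [if_pos hc] at hxlo
          exact h3 t List.mem_cons_self x hx ⟨l, List.mem_of_getLast? hgl, by omega⟩
        · rw [if_neg hc] at hxlo; omega
    have hmem_out' : ∀ x : Int, x ∈ out' ↔ x ∈ out ∨ (lo ≤ x ∧ x ≤ t.2) := by
      intro x
      rw [hout'_def, List.mem_append, PySem.List.mem_pyRange_one]
      constructor
      · rintro (h | ⟨ha, hb⟩)
        · exact Or.inl h
        · exact Or.inr ⟨ha, by omega⟩
      · rintro (h | ⟨ha, hb⟩)
        · exact Or.inl h
        · exact Or.inr ⟨ha, by omega⟩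
    have hp' : out'.Pairwise (· < ·) := by
      rw [hout'_def, List.pairwise_append]
      refine ⟨h2, PySem.List.pairwise_lt_pyRange_one _ _, ?_⟩
      intro a ha b hb
      have hbl := (PySem.List.mem_pyRange_one.mp hb).1
      exact lt_of_lt_of_le (hlo_gt a ha) hbl
    have h3' : ∀ t' ∈ rest, ∀ x : Int, t'.1 ≤ x → (∃ y ∈ out', x ≤ y) → x ∈ out' := by
      rintro t' ht' x hx ⟨y, hy, hxy⟩
      by_cases hxlo : x < lo
      · have : x ∈ out := hx_low x (le_trans (hstart t' ht') hx) hxlo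
        exact (hmem_out' x).mpr (Or.inl this)
      · rw [Int.not_lt] at hxlo
        rcases (hmem_out' y).mp hy with hyo | ⟨_, hy2⟩
        · have := hlo_gt y hyo; omega
        · exact (hmem_out' x).mpr (Or.inr ⟨hxlo, by omega⟩)
    obtain ⟨hpw, hmem⟩ := ih out' hrest hp' h3'
    rw [pvSweep_cons, ← hlo_def, ← hout'_def]
    refine ⟨hpw, ?_⟩
    intro x
    rw [hmem x]
    constructor
    · rintro (hx | ⟨t', ht', hc⟩)
      · rcases (hmem_out' x).mp hx with h | ⟨ha, hb⟩
        · exact Or.inl h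
        · exact Or.inr ⟨t, List.mem_cons_self, by omega, hb⟩
      · exact Or.inr ⟨t', List.mem_cons.mpr (Or.inr ht'), hc⟩
    · rintro (hx | ⟨t', ht', hc1, hc2⟩)
      · exact Or.inl ((hmem_out' x).mpr (Or.inl hx))
      · rcases List.mem_cons.mp ht' with rfl | ht'
        · by_cases hxlo : x < lo
          · exact Or.inl ((hmem_out' x).mpr (Or.inl (hx_low x hc1 hxlo)))
          · exact Or.inl ((hmem_out' x).mpr (Or.inr ⟨by omega, hc2⟩))
        · exact Or.inr ⟨t', ht', hc1, hc2⟩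

-- A's loop body, under Pre_, adds exactly the integers of the part's interval
theorem pvA_eq (spec : String) (h : Pre_parse_worker_ids spec) :
    parse_worker_ids spec =
      PySem.List.sorted (PySem.Set.ofList (((((((PySem.Str.split? spec ",").getD []).map PySem.Str.strip).filter (fun p => p ≠ ""))).map pvIv).flatMap pvRng))
        (fun x => x) false := by
  simp only [parse_worker_ids]
  rw [PySem.Set.ofList_eq_foldl, List.foldl_flatMap, List.foldl_map]
  have hcongr : ∀ (acc : PySem.Set Int), ∀ p ∈ ((((PySem.Str.split? spec ",").getD []).map PySem.Str.strip).filter (fun p => p ≠ "")),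
      (if PySem.Str.isIn "-" p then
        match PySem.Str.splitMax? p "-" 1 with
        | some [a, b] =>
          match PySem.Int.ofStr? (PySem.Str.strip a), PySem.Int.ofStr? (PySem.Str.strip b) with
          | some s, some e =>
            if e < s then acc
            else (PySem.List.pyRange s (e + 1) 1).foldl PySem.Set.add acc
          | _, _ => acc
        | _ => acc
      else
        match PySem.Int.ofStr? p with
        | some v => PySem.Set.add acc v
        | none => acc) = (pvRng (pvIv p)).foldl PySem.Set.add acc := by
    intro acc p hp
    have hok := h p hp
    by_cases hin : PySem.Str.isIn "-" p
    · rw [if_pos hin]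
      have hinc : PySem.Chars.isIn ['-'] p.toList = true := by simpa using hin
      rcases hsp : PySem.Str.splitMax? p "-" 1 with _ | ⟨_ | ⟨a, _ | ⟨b, _ | ⟨c, l⟩⟩⟩⟩
      · simp [pvPartOk, hinc, hsp] at hok
      · simp [pvPartOk, hinc, hsp] at hok
      · simp [pvPartOk, hinc, hsp] at hok
      · rcases hs1 : PySem.Int.ofStr? (PySem.Str.strip a) with _ | s <;>
          rcases hs2 : PySem.Int.ofStr? (PySem.Str.strip b) with _ | e
        · simp [pvPartOk, hinc, hsp, hs1] at hok
        · simp [pvPartOk, hinc, hsp, hs1] at hok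
        · simp [pvPartOk, hinc, hsp, hs2] at hok
        · have hle : s ≤ e := by simpa [pvPartOk, hinc, hsp, hs1, hs2] using hok
          have hns : ¬ (e < s) := by omega
          simp [pvRng, pvIv, hinc, hsp, hs1, hs2, hns]
      · exfalso
        simp only [pvPartOk, hsp, Option.getD_some] at hok
        rw [if_pos hin] at hok
        simp only [Bool.and_eq_true, beq_iff_eq, List.length_cons] at hok
        omega
    · rw [if_neg hin]
      have hin' : PySem.Str.isIn "-" p = false := by simpa using hin
      have hinc' : PySem.Chars.isIn ['-'] p.toList = false := by simpa using hin
      have hok' := hok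
      simp only [pvPartOk] at hok'
      rw [if_neg hin] at hok'
      rcases ho : PySem.Int.ofStr? p with _ | v <;> rw [ho] at hok'
      · exact absurd hok' (by simp)
      · simp [pvRng, pvIv, hinc', ho, PySem.List.pyRange_one_singleton]
  rw [PySem.List.foldl_congr_mem _ _ _ _ hcongr]
  rfl

-- B's first loop, under Pre_, collects exactly the parts' intervals in order
theorem pvB_eq (spec : String) (h : Pre_parse_worker_ids spec) :
    parse_worker_ids_alt spec =
      pvSweep (PySem.List.sorted ((((((PySem.Str.split? spec ",").getD []).map PySem.Str.strip).filter (fun p => p ≠ ""))).map pvIv) (fun t => t.1) false) [] := by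
  simp only [parse_worker_ids_alt, pvSweep]
  have hcongr : ∀ (acc : List (Int × Int)), ∀ p ∈ ((((PySem.Str.split? spec ",").getD []).map PySem.Str.strip).filter (fun p => p ≠ "")),
      (if PySem.Str.isIn "-" p then
        let ab := (PySem.Str.splitMax? p "-" 1).getD []
        let lo? := PySem.Int.ofStr? (PySem.Str.strip (ab.headD ""))
        let hi? := PySem.Int.ofStr? (PySem.Str.strip ((ab.drop 1).headD ""))
        if lo?.isSome && hi?.isSome then
          if hi?.getD 0 < lo?.getD 0 then acc
          else acc ++ [(lo?.getD 0, hi?.getD 0)]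
        else acc
      else
        let v? := PySem.Int.ofStr? p
        if v?.isSome then acc ++ [(v?.getD 0, v?.getD 0)]
        else acc) = acc ++ [pvIv p] := by
    intro acc p hp
    have hok := h p hp
    by_cases hin : PySem.Str.isIn "-" p
    · rw [if_pos hin]
      have hinc : PySem.Chars.isIn ['-'] p.toList = true := by simpa using hin
      rcases hsp : PySem.Str.splitMax? p "-" 1 with _ | ⟨_ | ⟨a, _ | ⟨b, _ | ⟨c, l⟩⟩⟩⟩
      · simp [pvPartOk, hinc, hsp] at hok
      · simp [pvPartOk, hinc, hsp] at hok
      · simp [pvPartOk, hinc, hsp] at hok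
      · rcases hs1 : PySem.Int.ofStr? (PySem.Str.strip a) with _ | s <;>
          rcases hs2 : PySem.Int.ofStr? (PySem.Str.strip b) with _ | e
        · simp [pvPartOk, hinc, hsp, hs1] at hok
        · simp [pvPartOk, hinc, hsp, hs1] at hok
        · simp [pvPartOk, hinc, hsp, hs2] at hok
        · have hle : s ≤ e := by simpa [pvPartOk, hinc, hsp, hs1, hs2] using hok
          have hns : ¬ (e < s) := by omega
          simp [pvIv, hinc, hsp, hs1, hs2, hns]
      · exfalso
        simp only [pvPartOk, hsp, Option.getD_some] at hok
        rw [if_pos hin] at hok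
        simp only [Bool.and_eq_true, beq_iff_eq, List.length_cons] at hok
        omega
    · rw [if_neg hin]
      have hin' : PySem.Str.isIn "-" p = false := by simpa using hin
      have hinc' : PySem.Chars.isIn ['-'] p.toList = false := by simpa using hin
      have hok' := hok
      simp only [pvPartOk] at hok'
      rw [if_neg hin] at hok'
      rcases ho : PySem.Int.ofStr? p with _ | v <;> rw [ho] at hok'
      · exact absurd hok' (by simp)
      · simp [pvIv, hinc', ho]
  rw [PySem.List.foldl_congr_mem _ _ _ _ hcongr,
      PySem.List.foldl_append_singleton_eq_map, List.nil_append]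

-- ===== VERDICT (by name: the statement is the Claim_ definition above) =====
theorem parse_worker_ids_spec : Claim_equal_parse_worker_ids := by
  intro spec _ hpre
  unfold Spec_parse_worker_ids
  rw [pvA_eq spec hpre, pvB_eq spec hpre]
  set I := (((((PySem.Str.split? spec ",").getD []).map PySem.Str.strip).filter (fun p => p ≠ ""))).map pvIv with hI
  set Is := PySem.List.sorted I (fun t => t.1) false with hIs
  have hs : Is.Pairwise (fun a b => a.1 ≤ b.1) := PySem.List.sorted_pairwise I (fun t => t.1)
  obtain ⟨hpw, hmem⟩ := pvSweep_spec Is [] hs (by simp) (by simp)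
  have hmemL : ∀ x : Int, x ∈ pvSweep Is [] ↔ x ∈ I.flatMap pvRng := by
    intro x
    rw [hmem x, List.mem_flatMap]
    simp only [List.not_mem_nil, false_or]
    constructor
    · rintro ⟨t, ht, hc1, hc2⟩
      exact ⟨t, (PySem.List.mem_sorted I _ false t).mp ht,
        PySem.List.mem_pyRange_one.mpr ⟨hc1, by omega⟩⟩
    · rintro ⟨t, ht, hx⟩
      rcases PySem.List.mem_pyRange_one.mp hx with ⟨hc1, hc2⟩
      exact ⟨t, (PySem.List.mem_sorted I _ false t).mpr ht, hc1, by omega⟩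
  have hnd : (pvSweep Is []).Nodup := hpw.imp (fun h => ne_of_lt h)
  refine PySem.List.sorted_eq_of_perm_of_pairwise_lt _ _ _ ?_ hpw
  refine (List.perm_ext_iff_of_nodup hnd (PySem.Set.nodup_ofList _)).mpr ?_
  intro a
  rw [hmemL a, PySem.Set.mem_ofList]
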